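-- pv_equiv track=rewrite | github.com/kim-taehan/si-code | sicode/init/renderer.py | _select_fence
-- ===== SOURCE A (Python) =====
-- _FENCE_REPLACEMENT: str = "```"
--
-- def _select_fence(content: str) -> str:
--     r"""본문에 ``\`\`\`` 가 등장하면 한 글자 더 긴 펜스를 사용한다."""
--     if _FENCE_REPLACEMENT not in content:
--         return _FENCE_REPLACEMENT
--     # 본문 안 펜스 길이 + 1 만큼의 백틱을 쓰면 충돌이 나지 않는다.
--     longest = 0
--     run = 0
--     for ch in content:
--         if ch == "`":
--             run += 1
--             longest = max(longest, run)
--         else: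
--             run = 0
--     return "`" * max(longest + 1, 3)
-- ===== SOURCE B (Python) =====
-- _FENCE_REPLACEMENT: str = "```"
--
-- def _select_fence(content: str) -> str:
--     n = 3
--     while "`" * n in content:
--         n += 1
--     return "`" * n
-- ===== Notes on version B (the rewrite author's own statement) =====
-- stated objective: simpler
-- what changed: Replaces the manual longest-run/current-run counter loop with a search for the shortest fence of length at least 3 that does not occur as a substring of the content, growing the candidate length by one while it still occurs.
import Mathlib
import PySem

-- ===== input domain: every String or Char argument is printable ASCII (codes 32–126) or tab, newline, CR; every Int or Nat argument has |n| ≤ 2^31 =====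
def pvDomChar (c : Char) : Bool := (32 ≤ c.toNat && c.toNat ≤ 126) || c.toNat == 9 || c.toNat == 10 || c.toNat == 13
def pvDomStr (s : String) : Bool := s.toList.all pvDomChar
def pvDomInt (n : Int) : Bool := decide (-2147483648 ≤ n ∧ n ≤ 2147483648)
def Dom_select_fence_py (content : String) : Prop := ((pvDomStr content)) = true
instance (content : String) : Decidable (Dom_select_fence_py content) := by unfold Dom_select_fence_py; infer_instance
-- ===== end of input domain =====

-- B replaces A's longest-run/current-run counter loop with growing the fence until '`'*n is no substring (simpler).

-- ===== PORT A =====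
-- A's loop: longest/run counters over the characters.
def select_fence_py (content : String) : String :=
  if ¬ PySem.Str.isIn "```" content then "```"
  else
    String.ofList (List.replicate
      (max ((content.toList.foldl
        (fun (p : Int × Int) ch =>
          if ch = '`' then (max p.1 (p.2 + 1), p.2 + 1) else (p.1, 0))
        (0, 0)).1 + 1) 3).toNat '`')

-- ===== PORT B =====
-- B's while-loop: n grows while '`'*n occurs in content; fuel bounds the loop
-- ('`'*n with n > len(content) is never a substring, so length+1 fuel suffices).
def selectFenceLoop (cs : List Char) (n : Nat) : Nat → Nat
  | 0 => n
  | fuel + 1 =>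
    if PySem.Chars.isIn (List.replicate n '`') cs then selectFenceLoop cs (n + 1) fuel
    else n

def select_fence_py_alt (content : String) : String :=
  String.ofList (List.replicate (selectFenceLoop content.toList 3 (content.toList.length + 1)) '`')

-- ===== PRECONDITION & SPEC =====
def Spec_select_fence_py (content : String) (out : String) : Prop := out = select_fence_py_alt content
instance (content : String) (out : String) : Decidable (Spec_select_fence_py content out) := by unfold Spec_select_fence_py; infer_instance

-- ===== CLAIM (what is proved, stated in full; the proofs are below) =====
def Claim_equal_select_fence_py : Prop := ∀ (content : String), Dom_select_fence_py content → Spec_select_fence_py content (select_fence_py content)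

-- ===== LEMMAS AND PROOFS =====

-- length of the leading backtick run
def headRun : List Char → Nat
  | [] => 0
  | c :: cs => if c = '`' then headRun cs + 1 else 0

-- longest backtick run, current run seeded with r
def seedMax (r : Nat) : List Char → Nat
  | [] => r
  | c :: cs => if c = '`' then seedMax (r + 1) cs else max r (seedMax 0 cs)

-- trailing run counter seeded with r
def tailRun (r : Nat) : List Char → Nat
  | [] => r
  | c :: cs => if c = '`' then tailRun (r + 1) cs else tailRun 0 cs

theorem le_seedMax (r : Nat) (cs : List Char) : r ≤ seedMax r cs := by
  induction cs generalizing r with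
  | nil => simp [seedMax]
  | cons c cs ih =>
    simp only [seedMax]
    split
    · exact le_trans (Nat.le_succ r) (ih (r + 1))
    · omega

theorem seedMax_le (r : Nat) (cs : List Char) : seedMax r cs ≤ r + cs.length := by
  induction cs generalizing r with
  | nil => simp [seedMax]
  | cons c cs ih =>
    simp only [seedMax, List.length_cons]
    split
    · have := ih (r + 1); omega
    · have := ih 0; omega

theorem seedMax_eq (r : Nat) (cs : List Char) :
    seedMax r cs = max (r + headRun cs) (seedMax 0 cs) := by
  induction cs generalizing r with
  | nil => simp [seedMax, headRun]
  | cons c cs ih =>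
    by_cases hc : c = '`'
    · subst hc
      have h1 : seedMax r ('`' :: cs) = seedMax (r + 1) cs := by simp [seedMax]
      have h2 : seedMax 0 ('`' :: cs) = seedMax 1 cs := by simp [seedMax]
      have h3 : headRun ('`' :: cs) = headRun cs + 1 := by simp [headRun]
      rw [h1, h2, h3, ih (r + 1), ih 1]
      omega
    · have h1 : seedMax r (c :: cs) = max r (seedMax 0 cs) := by simp [seedMax, hc]
      have h2 : seedMax 0 (c :: cs) = max 0 (seedMax 0 cs) := by simp [seedMax, hc]
      have h3 : headRun (c :: cs) = 0 := by simp [headRun, hc]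
      rw [h1, h2, h3]
      omega

theorem replicate_prefix_iff (n : Nat) (cs : List Char) :
    List.replicate n '`' <+: cs ↔ n ≤ headRun cs := by
  induction n generalizing cs with
  | zero => simp
  | succ n ih =>
    cases cs with
    | nil => simp [headRun]
    | cons c cs =>
      rw [List.replicate_succ, List.cons_prefix_cons]
      by_cases hc : c = '`'
      · subst hc
        simp [headRun, ih]
      · have h3 : headRun (c :: cs) = 0 := by simp [headRun, hc]
        rw [h3]
        constructor
        · rintro ⟨h1, -⟩
          exact absurd h1.symm hc
        · omega

theorem replicate_infix_iff (n : Nat) (cs : List Char) :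
    List.replicate n '`' <:+: cs ↔ n ≤ seedMax 0 cs := by
  induction cs with
  | nil => simp [seedMax, List.replicate_eq_nil_iff]
  | cons c cs ih =>
    rw [List.infix_cons_iff, replicate_prefix_iff, ih]
    by_cases hc : c = '`'
    · subst hc
      have h1 : seedMax 0 ('`' :: cs) = seedMax 1 cs := by simp [seedMax]
      have h3 : headRun ('`' :: cs) = headRun cs + 1 := by simp [headRun]
      rw [h1, h3, seedMax_eq 1 cs]
      omega
    · have h1 : seedMax 0 (c :: cs) = max 0 (seedMax 0 cs) := by simp [seedMax, hc]
      have h3 : headRun (c :: cs) = 0 := by simp [headRun, hc]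
      rw [h1, h3]
      omega

-- A's foldl computes the longest backtick run
theorem foldA (cs : List Char) (l r : Nat) (h : r ≤ l) :
    cs.foldl
      (fun (p : Int × Int) ch =>
        if ch = '`' then (max p.1 (p.2 + 1), p.2 + 1) else (p.1, 0))
      ((l : Int), (r : Int))
    = (((max l (seedMax r cs) : Nat) : Int), ((tailRun r cs : Nat) : Int)) := by
  induction cs generalizing l r with
  | nil => simp [seedMax, tailRun, Nat.max_eq_left h]
  | cons c cs ih =>
    by_cases hc : c = '`'
    · subst hc
      have h1 : ((max (l : Int) ((r : Int) + 1), (r : Int) + 1) : Int × Int)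
          = (((max l (r + 1) : Nat) : Int), ((r + 1 : Nat) : Int)) := by
        push_cast; rfl
      simp only [List.foldl_cons, reduceIte]
      rw [h1, ih (max l (r + 1)) (r + 1) (le_max_right _ _)]
      have h3 := le_seedMax (r + 1) cs
      have h4 : seedMax r ('`' :: cs) = seedMax (r + 1) cs := by simp [seedMax]
      have h5 : tailRun r ('`' :: cs) = tailRun (r + 1) cs := by simp [tailRun]
      rw [h4, h5]
      have h6 : max (max l (r + 1)) (seedMax (r + 1) cs) = max l (seedMax (r + 1) cs) := by
        omega
      rw [h6]
    · simp only [List.foldl_cons]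
      rw [if_neg hc]
      have h1 : (((l : Int), (0 : Int)) : Int × Int) = (((l : Nat) : Int), ((0 : Nat) : Int)) := by
        push_cast; rfl
      rw [h1, ih l 0 (Nat.zero_le l)]
      have h4 : seedMax r (c :: cs) = max r (seedMax 0 cs) := by simp [seedMax, hc]
      have h5 : tailRun r (c :: cs) = tailRun 0 cs := by simp [tailRun, hc]
      rw [h4, h5]
      have h6 : max l (max r (seedMax 0 cs)) = max l (seedMax 0 cs) := by omega
      rw [h6]

-- B's loop returns max n (longest run + 1) given enough fuel
theorem loopEq (cs : List Char) (fuel n : Nat) (h : seedMax 0 cs < n + fuel) :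
    selectFenceLoop cs n fuel = max n (seedMax 0 cs + 1) := by
  induction fuel generalizing n with
  | zero => simp only [selectFenceLoop]; omega
  | succ fuel ih =>
    simp only [selectFenceLoop]
    by_cases hin : PySem.Chars.isIn (List.replicate n '`') cs = true
    · have hn : n ≤ seedMax 0 cs := (replicate_infix_iff n cs).mp
        ((PySem.Chars.isIn_iff_infix _ _).mp hin)
      rw [if_pos hin, ih (n + 1) (by omega)]
      omega
    · have hn : ¬ n ≤ seedMax 0 cs := fun hle => hin
        ((PySem.Chars.isIn_iff_infix _ _).mpr ((replicate_infix_iff n cs).mpr hle))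
      rw [if_neg hin]
      omega

-- ===== VERDICT (by name: the statement is the Claim_ definition above) =====
theorem select_fence_py_spec : Claim_equal_select_fence_py := by
  intro content _
  unfold Spec_select_fence_py select_fence_py select_fence_py_alt
  set cs := content.toList with hcs
  set L := seedMax 0 cs with hL
  have hloop : selectFenceLoop cs 3 (cs.length + 1) = max 3 (L + 1) :=
    loopEq cs (cs.length + 1) 3 (by have := seedMax_le 0 cs; omega)
  have htick : ("```".toList : List Char) = List.replicate 3 '`' := by decide
  have hbridge : PySem.Str.isIn "```" content
      = PySem.Chars.isIn (List.replicate 3 '`') cs := by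
    rw [PySem.Str.isIn_eq, htick]
  by_cases hin : PySem.Chars.isIn (List.replicate 3 '`') cs = true
  · have h3 : 3 ≤ L := (replicate_infix_iff 3 cs).mp
      ((PySem.Chars.isIn_iff_infix _ _).mp hin)
    rw [if_neg (by rw [hbridge, hin]; decide)]
    rw [show ((0 : Int), (0 : Int)) = (((0 : Nat) : Int), ((0 : Nat) : Int)) from rfl,
      foldA cs 0 0 le_rfl]
    rw [hloop]
    congr 2
    simp only [← hL]
    omega
  · have h3 : ¬ 3 ≤ L := fun hle => hin
      ((PySem.Chars.isIn_iff_infix _ _).mpr ((replicate_infix_iff 3 cs).mpr hle))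
    rw [if_pos (by rw [hbridge]; exact hin)]
    rw [hloop]
    have h4 : max 3 (L + 1) = 3 := by omega
    rw [h4]
    decide
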